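-- pv_equiv track=rewrite | github.com/DavidManolitsas/music-finder | music/search/music_filter.py | filter_music_duplicates
-- ===== SOURCE A (Python) =====
-- def filter_music_duplicates(new_releases: []) -> []:
--     """
--     Remove any duplicate music releases.
--
--     :param new_releases: all new music releases by artist
--     :return: filtered music releases
--     """
--     # Dictionary to keep track of seen songs
--     seen_songs = {}
--
--     for release in new_releases:
--         song = release["song"]
--         if song in seen_songs:
--             # Check if the current release has a preview
--             if "preview" in release:
--                 seen_songs[song] = release
--         else:
--             seen_songs[song] = release
--
--     return list(seen_songs.values())
-- ===== SOURCE B (Python) =====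
-- def filter_music_duplicates(new_releases: []) -> []:
--     """
--     Remove any duplicate music releases.
--
--     :param new_releases: all new music releases by artist
--     :return: filtered music releases
--     """
--     # Group releases by song, preserving first-seen song order.
--     groups = {}
--     for release in new_releases:
--         groups.setdefault(release["song"], []).append(release)
--
--     # For each song keep the last release that has a preview, else the first.
--     result = []
--     for group in groups.values():
--         with_preview = [r for r in group if "preview" in r]
--         result.append(with_preview[-1] if with_preview else group[0])
--     return result
-- ===== Notes on version B (the rewrite author's own statement) =====
-- stated objective: alternative
-- what changed: Instead of A's single pass that conditionally overwrites a seen-songs dict, B first groups all releases by song in an ordered dict of lists and then selects, per song, the last release with a 'preview' key (else the group's first release).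
import Mathlib
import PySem

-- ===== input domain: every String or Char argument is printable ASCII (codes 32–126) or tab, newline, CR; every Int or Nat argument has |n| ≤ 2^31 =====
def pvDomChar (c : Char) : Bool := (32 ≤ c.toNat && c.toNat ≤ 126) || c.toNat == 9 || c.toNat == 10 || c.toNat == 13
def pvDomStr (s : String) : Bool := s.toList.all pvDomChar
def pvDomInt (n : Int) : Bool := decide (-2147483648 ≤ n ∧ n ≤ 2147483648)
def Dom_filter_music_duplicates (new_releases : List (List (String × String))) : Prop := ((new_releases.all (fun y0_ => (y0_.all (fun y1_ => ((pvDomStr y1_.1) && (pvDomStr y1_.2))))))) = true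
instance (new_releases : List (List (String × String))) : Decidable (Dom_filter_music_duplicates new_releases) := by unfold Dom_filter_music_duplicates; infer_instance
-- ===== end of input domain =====

-- B replaces A's conditional-overwrite pass with group-by-song then per-group selection
-- (last release with a preview, else the first); same results, different decomposition.

-- ===== PORT A =====
-- release["song"] on the Python dict a release denotes (duplicate keys: last wins, as in dict construction)
def pvLookupSong (release : List (String × String)) : Option String :=
  (PySem.Dict.ofList release).get? "song"

-- "preview" in release
def pvHasPreview (release : List (String × String)) : Bool :=
  (PySem.Dict.ofList release).contains "preview"

def filter_music_duplicates (new_releases : List (List (String × String))) : List (List (String × String)) :=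
  (new_releases.foldl
    (fun seen_songs release =>
      match pvLookupSong release with
      | none => seen_songs   -- release["song"] raises KeyError in Python; such inputs are outside Pre_
      | some song =>
        if seen_songs.contains song then
          if pvHasPreview release then seen_songs.insert song release else seen_songs
        else seen_songs.insert song release)
    PySem.Dict.empty).values

-- ===== PORT B =====
-- per-group choice: last release with a preview, else the group's first release
def pvPick (group : List (List (String × String))) : List (String × String) :=
  match (group.filter pvHasPreview).getLast? with
  | some r => r
  | none => group.headD []

def filter_music_duplicates_alt (new_releases : List (List (String × String))) : List (List (String × String)) :=
  ((new_releases.foldl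
     (fun groups release =>
       match pvLookupSong release with
       | none => groups   -- release["song"] raises KeyError in Python; such inputs are outside Pre_
       | some song => groups.modify song [] (· ++ [release]))
     PySem.Dict.empty).values).map pvPick

-- ===== PRECONDITION & SPEC =====
-- Pre_ excludes exactly the inputs where some release lacks a "song" key: there Python A (and B) raise KeyError.
def Pre_filter_music_duplicates (new_releases : List (List (String × String))) : Prop :=
  (new_releases.all (fun release => (PySem.Dict.ofList release).contains "song")) = true

instance (new_releases : List (List (String × String))) : Decidable (Pre_filter_music_duplicates new_releases) := by
  unfold Pre_filter_music_duplicates; infer_instance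

def pvWitness_filter_music_duplicates : (List (List (String × String))) :=
  [[("song", "a"), ("preview", "p")], [("song", "a")], [("song", "b")]]

def Spec_filter_music_duplicates (new_releases : List (List (String × String))) (out : List (List (String × String))) : Prop := out = filter_music_duplicates_alt new_releases
instance (new_releases : List (List (String × String))) (out : List (List (String × String))) : Decidable (Spec_filter_music_duplicates new_releases out) := by unfold Spec_filter_music_duplicates; infer_instance

-- ===== CLAIM (what is proved, stated in full; the proofs are below) =====
def Claim_equal_filter_music_duplicates : Prop := ∀ (new_releases : List (List (String × String))), Dom_filter_music_duplicates new_releases → Pre_filter_music_duplicates new_releases → Spec_filter_music_duplicates new_releases (filter_music_duplicates new_releases)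

-- ===== LEMMAS AND PROOFS =====

-- A's fold step / B's fold step, named for the proofs
def pvStepA (seen_songs : PySem.Dict String (List (String × String)))
    (release : List (String × String)) : PySem.Dict String (List (String × String)) :=
  match pvLookupSong release with
  | none => seen_songs
  | some song =>
    if seen_songs.contains song then
      if pvHasPreview release then seen_songs.insert song release else seen_songs
    else seen_songs.insert song release

def pvStepB (groups : PySem.Dict String (List (List (String × String))))
    (release : List (String × String)) : PySem.Dict String (List (List (String × String))) :=
  match pvLookupSong release with
  | none => groups
  | some song => groups.modify song [] (· ++ [release])

def pvMapPick (d : PySem.Dict String (List (List (String × String)))) :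
    PySem.Dict String (List (String × String)) :=
  PySem.Dict.mk (d.items.map (fun p => (p.1, pvPick p.2)))

theorem pvPick_append (g : List (List (String × String))) (r : List (String × String)) (hg : g ≠ []) :
    pvPick (g ++ [r]) = if pvHasPreview r then r else pvPick g := by
  unfold pvPick
  rw [List.filter_append]
  by_cases hp : pvHasPreview r = true
  · simp [hp]
  · simp only [Bool.not_eq_true] at hp
    simp only [hp, List.filter_cons, Bool.false_eq_true, if_false, List.filter_nil,
      List.append_nil, List.getLast?_eq_head?_reverse]
    cases g with
    | nil => exact absurd rfl hg
    | cons a t => cases List.find? pvHasPreview (a :: t).reverse <;> simp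

theorem pvPick_single (r : List (String × String)) : pvPick [r] = r := by
  unfold pvPick
  by_cases hp : pvHasPreview r = true <;> simp [hp]

theorem contains_pvMapPick (d : PySem.Dict String (List (List (String × String)))) (s : String) :
    (pvMapPick d).contains s = d.contains s := by
  simp only [pvMapPick, PySem.Dict.contains, List.any_map]
  rfl

theorem pvMapPick_insert (d : PySem.Dict String (List (List (String × String))))
    (k : String) (g : List (List (String × String))) :
    pvMapPick (d.insert k g) = (pvMapPick d).insert k (pvPick g) := by
  unfold PySem.Dict.insert
  rw [contains_pvMapPick]
  by_cases hc : d.contains k = true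
  · simp only [hc, if_true]
    unfold pvMapPick
    apply PySem.Dict.ext
    simp only [List.map_map]
    apply List.map_congr_left
    intro p _
    by_cases h : p.1 = k <;> simp [h]
  · simp only [hc]
    unfold pvMapPick
    apply PySem.Dict.ext
    simp

theorem insert_self_of_mem (d : PySem.Dict String (List (String × String)))
    (k : String) (v : List (String × String)) (hnd : d.keys.Nodup)
    (hm : (k, v) ∈ d.items) : d.insert k v = d := by
  have hc : d.contains k = true := by
    unfold PySem.Dict.contains
    exact List.any_eq_true.mpr ⟨(k, v), hm, by simp⟩
  unfold PySem.Dict.insert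
  rw [hc, if_pos rfl]
  apply PySem.Dict.ext
  conv_rhs => rw [← List.map_id d.items]
  apply List.map_congr_left
  intro p hp
  by_cases h : (p.1 == k) = true
  · have hk : p.1 = k := by simpa using h
    have hpm : (k, p.2) ∈ d.items := by rw [← hk]; exact hp
    have h1 := PySem.Dict.get?_of_mem_items d hm hnd
    have h2 := PySem.Dict.get?_of_mem_items d hpm hnd
    have hv : p.2 = v := by rw [h1] at h2; exact (Option.some.inj h2).symm
    rw [if_pos h]
    exact Prod.ext hk.symm hv.symm
  · simp [h]

theorem pvStep_comm (d : PySem.Dict String (List (List (String × String))))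
    (r : List (String × String)) (hnd : d.keys.Nodup)
    (hne : ∀ p ∈ d.items, p.2 ≠ []) :
    pvStepA (pvMapPick d) r = pvMapPick (pvStepB d r) := by
  unfold pvStepA pvStepB
  cases hs : pvLookupSong r with
  | none => rfl
  | some s =>
    simp only [PySem.Dict.modify, pvMapPick_insert, contains_pvMapPick]
    by_cases hc : d.contains s = true
    · -- existing song: group g is nonempty
      obtain ⟨g, hg⟩ : ∃ g, d.get? s = some g := by
        cases hgo : d.get? s with
        | none =>
          exfalso
          have := PySem.Dict.contains_eq_isSome_get? (d := d) (k := s)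
          rw [hgo] at this; simp [this] at hc
        | some g => exact ⟨g, rfl⟩
      have hgd : d.getD s [] = g := PySem.Dict.getD_of_get?_eq_some d [] hg
      have hgm : (s, g) ∈ d.items := PySem.Dict.mem_items_of_get?_eq_some d hg
      have hgne : g ≠ [] := hne _ hgm
      rw [hc, if_pos rfl, hgd, pvPick_append g r hgne]
      by_cases hp : pvHasPreview r = true
      · simp [hp]
      · simp only [Bool.not_eq_true] at hp
        rw [hp]
        simp only [if_false, Bool.false_eq_true]
        have hm' : (s, pvPick g) ∈ (pvMapPick d).items := by
          unfold pvMapPick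
          exact List.mem_map.mpr ⟨(s, g), hgm, rfl⟩
        have hnd' : (pvMapPick d).keys.Nodup := by
          unfold pvMapPick
          simpa [PySem.Dict.keys, List.map_map, Function.comp] using hnd
        rw [insert_self_of_mem _ _ _ hnd' hm']
    · simp only [Bool.not_eq_true] at hc
      rw [hc, PySem.Dict.getD_of_not_contains d [] hc]
      simp only [Bool.false_eq_true, if_false, List.nil_append]
      simp [pvPick_single]

theorem keys_pvStepB (d : PySem.Dict String (List (List (String × String))))
    (r : List (String × String)) (hnd : d.keys.Nodup) : (pvStepB d r).keys.Nodup := by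
  unfold pvStepB
  cases pvLookupSong r with
  | none => exact hnd
  | some s => exact PySem.Dict.nodup_keys_insert _ _ _ hnd

theorem ne_pvStepB (d : PySem.Dict String (List (List (String × String))))
    (r : List (String × String)) (hne : ∀ p ∈ d.items, p.2 ≠ []) :
    ∀ p ∈ (pvStepB d r).items, p.2 ≠ [] := by
  unfold pvStepB
  cases pvLookupSong r with
  | none => exact hne
  | some s =>
    intro p hp
    unfold PySem.Dict.modify at hp
    rcases (PySem.Dict.mem_items_insert _ _ _ _).mp hp with h | ⟨h, _⟩
    · subst h; simp
    · exact hne _ h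

theorem pvFold_comm (l : List (List (String × String)))
    (d : PySem.Dict String (List (List (String × String))))
    (hnd : d.keys.Nodup) (hne : ∀ p ∈ d.items, p.2 ≠ []) :
    l.foldl pvStepA (pvMapPick d) = pvMapPick (l.foldl pvStepB d) := by
  induction l generalizing d with
  | nil => rfl
  | cons r l ih =>
    simp only [List.foldl_cons]
    rw [pvStep_comm d r hnd hne]
    exact ih _ (keys_pvStepB d r hnd) (ne_pvStepB d r hne)

theorem values_pvMapPick (d : PySem.Dict String (List (List (String × String)))) :
    (pvMapPick d).values = d.values.map pvPick := by
  simp [pvMapPick, PySem.Dict.values, List.map_map, Function.comp]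

-- ===== VERDICT (by name: the statement is the Claim_ definition above) =====
theorem filter_music_duplicates_spec : Claim_equal_filter_music_duplicates := by
  intro nr _ _
  show filter_music_duplicates nr = filter_music_duplicates_alt nr
  unfold filter_music_duplicates filter_music_duplicates_alt
  have h0 : pvMapPick PySem.Dict.empty = PySem.Dict.empty := rfl
  have := pvFold_comm nr PySem.Dict.empty (by simp [PySem.Dict.keys, PySem.Dict.empty])
      (by simp [PySem.Dict.empty])
  rw [h0] at this
  show (nr.foldl pvStepA PySem.Dict.empty).values = ((nr.foldl pvStepB PySem.Dict.empty).values).map pvPick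
  rw [this, values_pvMapPick]
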